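-- pv_equiv track=rewrite | github.com/nonaninona/algorithm | 프로그래머스/3/258709. 주사위 고르기/주사위 고르기.py | calcCount
-- ===== SOURCE A (Python) =====
-- def calcCount(Asums, Bsums):
--     Asums.sort()
--     lenASums = len(Asums)
--
--     count = 0
--     for Bs in Bsums:
--         idx = findGreaterIdx(Asums, Bs)
--         count += lenASums - idx
--
--     return count
--
-- def findGreaterIdx(Asums, Bs):
--     lo = -1
--     hi = len(Asums)
--
--     while lo + 1 < hi:
--         mid = (lo + hi) // 2
--         if not Asums[mid] > Bs:
--             lo = mid
--         else:
--             hi = mid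
--     return hi
-- ===== SOURCE B (Python) =====
-- def calcCount(Asums, Bsums):
--     # Same return value as A; Asums is sorted in place exactly as A does (Bsums untouched).
--     Asums.sort()
--     sortedB = sorted(Bsums)
--     n = len(Asums)
--     j = 0
--     count = 0
--     for b in sortedB:
--         while j < n and Asums[j] <= b:
--             j += 1
--         count += n - j
--     return count
-- ===== Notes on version B (the rewrite author's own statement) =====
-- stated objective: faster
-- what changed: Replaces one hand-written binary search per Bsum with a single merge-style sweep: sort a copy of Bsums and advance one monotone pointer through the sorted Asums, adding len(Asums)-j per Bsum.
import Mathlib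
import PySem

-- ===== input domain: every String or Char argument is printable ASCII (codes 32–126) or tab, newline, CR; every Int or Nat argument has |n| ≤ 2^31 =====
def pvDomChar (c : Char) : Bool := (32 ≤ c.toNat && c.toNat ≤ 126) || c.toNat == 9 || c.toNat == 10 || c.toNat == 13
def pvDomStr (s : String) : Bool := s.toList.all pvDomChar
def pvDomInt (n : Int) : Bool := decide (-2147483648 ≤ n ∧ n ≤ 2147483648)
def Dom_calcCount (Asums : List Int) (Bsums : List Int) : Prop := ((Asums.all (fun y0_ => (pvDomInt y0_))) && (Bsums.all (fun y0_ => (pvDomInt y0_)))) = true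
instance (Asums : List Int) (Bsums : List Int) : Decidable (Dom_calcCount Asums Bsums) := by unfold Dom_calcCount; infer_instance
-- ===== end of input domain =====

-- B replaces A's per-query binary search by a single merge sweep over sorted copies (measured faster);
-- return-value equivalence only: both Pythons sort Asums in place, Bsums is not mutated by either.

-- ===== PORT A =====
-- while lo + 1 < hi: mid = (lo+hi)//2; if not Asums[mid] > Bs: lo = mid else: hi = mid
def fgiLoop (s : List Int) (b : Int) (lo hi : Int) : Int :=
  if _h : lo + 1 < hi then
    let mid := PySem.Int.floordiv (lo + hi) 2
    if ¬ (PySem.List.pyGetD s mid 0 > b) then fgiLoop s b mid hi else fgiLoop s b lo mid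
  else hi
termination_by (hi - lo).toNat
decreasing_by
  all_goals
    simp only [mid, PySem.Int.floordiv_eq_ediv_of_pos (by omega : (0:Int) < 2)] at *
    omega

def findGreaterIdx (Asums : List Int) (Bs : Int) : Int :=
  fgiLoop Asums Bs (-1) (Asums.length : Int)

def calcCount (Asums : List Int) (Bsums : List Int) : Int :=
  let s := PySem.List.sorted Asums (fun x => x) false
  let lenASums : Int := (s.length : Int)
  Bsums.foldl (fun count Bs => count + (lenASums - findGreaterIdx s Bs)) 0

-- ===== PORT B =====
-- while j < n and Asums[j] <= b: j += 1
def sweepAdvance (s : List Int) (b : Int) (j : Nat) : Nat :=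
  if h : j < s.length then
    if s[j] ≤ b then sweepAdvance s b (j + 1) else j
  else j
termination_by s.length - j

-- for b in sortedB: (advance j) ; count += n - j
def sweepLoop (s : List Int) (bs : List Int) (j : Nat) (count : Int) : Int :=
  match bs with
  | [] => count
  | b :: rest =>
    let j' := sweepAdvance s b j
    sweepLoop s rest j' (count + ((s.length : Int) - (j' : Int)))

def calcCount_alt (Asums : List Int) (Bsums : List Int) : Int :=
  let s := PySem.List.sorted Asums (fun x => x) false
  let sortedB := PySem.List.sorted Bsums (fun x => x) false
  sweepLoop s sortedB 0 0

-- ===== PRECONDITION & SPEC =====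
def Spec_calcCount (Asums : List Int) (Bsums : List Int) (out : Int) : Prop := out = calcCount_alt Asums Bsums
instance (Asums : List Int) (Bsums : List Int) (out : Int) : Decidable (Spec_calcCount Asums Bsums out) := by unfold Spec_calcCount; infer_instance

-- ===== CLAIM (what is proved, stated in full; the proofs are below) =====
def Claim_equal_calcCount : Prop := ∀ (Asums : List Int) (Bsums : List Int), Dom_calcCount Asums Bsums → Spec_calcCount Asums Bsums (calcCount Asums Bsums)

-- ===== LEMMAS AND PROOFS =====

-- the number of elements ≤ b in a ≤-sorted list classifies every index
theorem leCount_classifies (s : List Int) (hs : s.Pairwise (· ≤ ·)) (b : Int)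
    (i : Nat) (hi : i < s.length) :
    s[i] ≤ b ↔ i < s.countP (fun a => decide (a ≤ b)) := by
  induction s generalizing i with
  | nil => simp at hi
  | cons x t ih =>
    rw [List.pairwise_cons] at hs
    by_cases hx : x ≤ b
    · cases i with
      | zero => simp [hx]
      | succ k =>
        have := ih hs.2 k (by simpa using hi)
        simpa [List.countP_cons, hx, Nat.succ_lt_succ_iff] using this
    · have hz : (x :: t).countP (fun a => decide (a ≤ b)) = 0 := by
        rw [List.countP_eq_zero]
        intro y hy
        rcases List.mem_cons.mp hy with rfl | hyt
        · simpa using hx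
        · have : x ≤ y := hs.1 y hyt
          simp; omega
      rw [hz]
      constructor
      · intro hle
        exfalso
        cases i with
        | zero => simp at hle; exact hx hle
        | succ k =>
          have hk : k < t.length := by simpa using hi
          have : x ≤ t[k] := hs.1 _ (List.getElem_mem hk)
          have hle' : t[k] ≤ b := by simpa using hle
          exact hx (le_trans this hle')
      · omega

-- A's binary-search loop returns the count of elements ≤ b, on a sorted list
theorem fgiLoop_eq (s : List Int) (hs : s.Pairwise (· ≤ ·)) (b : Int) (lo hi : Int)
    (h1 : -1 ≤ lo) (h2 : hi ≤ (s.length : Int)) (h3 : lo < hi)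
    (hA : ∀ i : Nat, (i : Int) ≤ lo → ∀ h : i < s.length, s[i] ≤ b)
    (hB : ∀ i : Nat, hi ≤ (i : Int) → ∀ h : i < s.length, b < s[i]) :
    fgiLoop s b lo hi = ((s.countP (fun a => decide (a ≤ b)) : Nat) : Int) := by
  rw [fgiLoop]
  by_cases hlt : lo + 1 < hi
  · simp only [hlt, dif_pos]
    have hmid : lo < PySem.Int.floordiv (lo + hi) 2 ∧ PySem.Int.floordiv (lo + hi) 2 < hi := by
      rw [PySem.Int.floordiv_eq_ediv_of_pos (by omega : (0:Int) < 2)]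
      omega
    set mid := PySem.Int.floordiv (lo + hi) 2 with hmiddef
    have hmid0 : 0 ≤ mid := by omega
    have hmidlen : mid < (s.length : Int) := by omega
    have hmn : mid.toNat < s.length := by omega
    have hget : PySem.List.pyGetD s mid 0 = s[mid.toNat] :=
      PySem.List.pyGetD_eq_getElem (xs := s) (i := mid) (d := 0) hmid0 hmidlen
    by_cases hc : s[mid.toNat] ≤ b
    · rw [if_pos (by rw [hget]; omega)]
      apply fgiLoop_eq s hs b mid hi (by omega) h2 (by omega)
      · intro i hi' h
        by_cases hieq : (i : Int) = mid
        · have : i = mid.toNat := by omega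
          subst this; exact hc
        · have hilt : i < mid.toNat := by omega
          have : s[i] ≤ s[mid.toNat] := by
            have := List.pairwise_iff_getElem.mp hs i mid.toNat h hmn hilt
            exact this
          exact le_trans this hc
      · exact hB
    · rw [if_neg (by rw [hget]; omega)]
      apply fgiLoop_eq s hs b lo mid h1 (by omega) (by omega)
      · exact hA
      · intro i hi' h
        by_cases hieq : (i : Int) = mid
        · have : i = mid.toNat := by omega
          subst this; omega
        · have hgt : mid.toNat < i := by omega
          have : s[mid.toNat] ≤ s[i] := List.pairwise_iff_getElem.mp hs mid.toNat i hmn h hgt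
          omega
  · simp only [hlt, dif_neg, not_false_iff]
    -- here lo + 1 = hi; every index is classified, so countP = hi
    have heq : lo + 1 = hi := by omega
    have hc := s.countP_le_length (p := fun a => decide (a ≤ b))
    set c := s.countP (fun a => decide (a ≤ b)) with hcdef
    by_cases hlen : hi.toNat < s.length
    · -- hi in range
      rcases lt_trichotomy (hi.toNat) c with h | h | h
      · exfalso
        have hcl : hi.toNat < s.length := hlen
        have := (leCount_classifies s hs b hi.toNat hcl).mpr h
        have := hB hi.toNat (by omega) hcl
        omega
      · omega
      · exfalso
        have hcl : c < s.length := by omega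
        have h1' := hA c (by omega) hcl
        have := (leCount_classifies s hs b c hcl).mp h1'
        omega
    · -- hi = length (since hi ≤ length and ¬ hi.toNat < length)
      have hhi : hi = (s.length : Int) := by omega
      rcases lt_or_ge c (s.length) with h | h
      · exfalso
        have h1' := hA c (by omega) h
        have := (leCount_classifies s hs b c h).mp h1'
        omega
      · omega
termination_by (hi - lo).toNat
decreasing_by
  all_goals
    simp only [hmiddef, PySem.Int.floordiv_eq_ediv_of_pos (by omega : (0:Int) < 2)] at *
    omega

theorem findGreaterIdx_eq (s : List Int) (hs : s.Pairwise (· ≤ ·)) (b : Int) :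
    findGreaterIdx s b = ((s.countP (fun a => decide (a ≤ b)) : Nat) : Int) := by
  unfold findGreaterIdx
  apply fgiLoop_eq s hs b (-1) (s.length) (by omega) (by omega) (by omega)
  · intro i hi h; omega
  · intro i hi h; exfalso; omega

-- B's inner while-loop lands exactly on the count of elements ≤ b, from any start ≤ that count
theorem sweepAdvance_eq (s : List Int) (hs : s.Pairwise (· ≤ ·)) (b : Int) (j : Nat)
    (hj : j ≤ s.countP (fun a => decide (a ≤ b))) :
    sweepAdvance s b j = s.countP (fun a => decide (a ≤ b)) := by
  rw [sweepAdvance]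
  set c := s.countP (fun a => decide (a ≤ b)) with hcdef
  by_cases h : j < s.length
  · simp only [h, dif_pos]
    by_cases hle : s[j] ≤ b
    · rw [if_pos hle]
      have : j < c := (leCount_classifies s hs b j h).mp hle
      exact sweepAdvance_eq s hs b (j + 1) (by omega)
    · rw [if_neg hle]
      have : ¬ j < c := fun hc => hle ((leCount_classifies s hs b j h).mpr hc)
      omega
  · simp only [h, dif_neg, not_false_iff]
    have := s.countP_le_length (p := fun a => decide (a ≤ b))
    omega
termination_by s.length - j

-- B's outer loop accumulates the per-query counts, given a monotone start pointer
theorem sweepLoop_eq (s : List Int) (hs : s.Pairwise (· ≤ ·)) (bs : List Int)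
    (hbs : bs.Pairwise (· ≤ ·)) (j : Nat) (count : Int)
    (hj : ∀ b ∈ bs, j ≤ s.countP (fun a => decide (a ≤ b))) :
    sweepLoop s bs j count =
      count + (bs.map (fun b => (s.length : Int) - ((s.countP (fun a => decide (a ≤ b)) : Nat) : Int))).sum := by
  induction bs generalizing j count with
  | nil => simp [sweepLoop]
  | cons b rest ih =>
    rw [List.pairwise_cons] at hbs
    have hadv : sweepAdvance s b j = s.countP (fun a => decide (a ≤ b)) :=
      sweepAdvance_eq s hs b j (hj b (List.mem_cons_self ..))
    rw [sweepLoop]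
    simp only [hadv]
    rw [ih hbs.2 _ _ ?_]
    · simp [List.sum_cons]; ring
    · intro b' hb'
      have hbb' : b ≤ b' := hbs.1 b' hb'
      exact List.countP_mono_left (by intro a _ ha; simp only [decide_eq_true_eq] at ha ⊢; omega)

-- A's fold is the same sum, over Bsums in original order
theorem foldl_sub_count (s : List Int) (bs : List Int) (count : Int) :
    bs.foldl (fun count Bs => count + ((s.length : Int) - findGreaterIdx s Bs)) count =
      count + (bs.map (fun b => (s.length : Int) - findGreaterIdx s b)).sum := by
  induction bs generalizing count with
  | nil => simp
  | cons b rest ih => rw [List.foldl_cons, ih]; simp [List.sum_cons]; ring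

-- ===== VERDICT (by name: the statement is the Claim_ definition above) =====
theorem calcCount_spec : Claim_equal_calcCount := by
  intro Asums Bsums _
  unfold Spec_calcCount calcCount calcCount_alt
  set s := PySem.List.sorted Asums (fun x => x) false with hsdef
  set sB := PySem.List.sorted Bsums (fun x => x) false with hsBdef
  have hs : s.Pairwise (· ≤ ·) := by
    simpa using PySem.List.sorted_pairwise (xs := Asums) (key := fun x => x)
  have hsB : sB.Pairwise (· ≤ ·) := by
    simpa using PySem.List.sorted_pairwise (xs := Bsums) (key := fun x => x)
  rw [sweepLoop_eq s hs sB hsB 0 0 (by intro b _; omega)]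
  rw [foldl_sub_count]
  have hperm : sB.Perm Bsums := PySem.List.sorted_perm ..
  have h1 : Bsums.map (fun b => (s.length : Int) - findGreaterIdx s b) =
      Bsums.map (fun b => (s.length : Int) - ((s.countP (fun a => decide (a ≤ b)) : Nat) : Int)) := by
    apply List.map_congr_left
    intro b _
    rw [findGreaterIdx_eq s hs b]
  rw [h1, ← (hperm.map (fun b => (s.length : Int) - ((s.countP (fun a => decide (a ≤ b)) : Nat) : Int))).sum_eq]
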